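-- pv_equiv track=rewrite | github.com/jaiyue/GenAI-and-Software-Engineering | python_code_1/code_106.py | f
-- ===== SOURCE A (Python) =====
-- def f(n):
--     import math
--     res = []
--     for i in range(1, n + 1):
--         if i % 2 == 0:
--             res.append(math.factorial(i))
--         else:
--             res.append(i * (i + 1) // 2)
--     return res
-- ===== SOURCE B (Python) =====
-- def f(n):
--     # Stage 1: running-product table of the first n factorials (one multiplication each).
--     facts = []
--     p = 1
--     for i in range(1, n + 1):
--         p *= i
--         facts.append(p)
--     # Stage 2: pick from the table at even indices, triangular formula at odd ones.
--     return [facts[i - 1] if i % 2 == 0 else i * (i + 1) // 2 for i in range(1, n + 1)]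
-- ===== Notes on version B (the rewrite author's own statement) =====
-- stated objective: faster
-- what changed: B first builds a table of the first n factorials with a single running product (one multiplication per step) and then produces the answer by a list comprehension that indexes that table, instead of A's loop calling math.factorial(i) afresh at each even index.
import Mathlib
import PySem

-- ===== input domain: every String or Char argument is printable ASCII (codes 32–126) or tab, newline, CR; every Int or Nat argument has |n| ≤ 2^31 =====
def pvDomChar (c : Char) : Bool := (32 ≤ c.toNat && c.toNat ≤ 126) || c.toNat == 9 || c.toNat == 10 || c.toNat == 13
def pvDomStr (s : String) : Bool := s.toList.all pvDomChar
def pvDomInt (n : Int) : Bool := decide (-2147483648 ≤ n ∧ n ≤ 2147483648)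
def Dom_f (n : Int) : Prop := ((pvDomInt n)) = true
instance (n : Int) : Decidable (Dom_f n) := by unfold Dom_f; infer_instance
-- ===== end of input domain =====

-- B builds a table of the first n factorials with one running multiplication per step
-- and then indexes it from a comprehension, instead of recomputing math.factorial(i)
-- at every even index (objective: faster).

-- ===== PORT A =====
-- port of the library call math.factorial(i); exact for 0 ≤ i (A only calls it with i ≥ 1)
def pyFactorial (i : Int) : Int := (Nat.factorial i.toNat : Int)

-- loop body of A
def stepA (res : List Int) (i : Int) : List Int :=
  res ++ [if PySem.Int.mod i 2 = 0 then pyFactorial i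
          else PySem.Int.floordiv (i * (i + 1)) 2]

def f (n : Int) : List Int :=
  (PySem.List.pyRange 1 (n + 1) 1).foldl stepA []

-- ===== PORT B =====
-- stage 1 of B: the running-product factorial table, state (p, facts)
def factTable (n : Int) : Int × List Int :=
  (PySem.List.pyRange 1 (n + 1) 1).foldl (fun st i => (st.1 * i, st.2 ++ [st.1 * i])) (1, [])

def f_alt (n : Int) : List Int :=
  let facts := (factTable n).2
  -- stage 2 of B: the comprehension; facts[i-1] is always in range, so pyGetD is exact here
  (PySem.List.pyRange 1 (n + 1) 1).map (fun i =>
    if PySem.Int.mod i 2 = 0 then PySem.List.pyGetD facts (i - 1) 0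
    else PySem.Int.floordiv (i * (i + 1)) 2)

-- ===== PRECONDITION & SPEC =====
def Spec_f (n : Int) (out : List Int) : Prop := out = f_alt n
instance (n : Int) (out : List Int) : Decidable (Spec_f n out) := by unfold Spec_f; infer_instance

-- ===== CLAIM (what is proved, stated in full; the proofs are below) =====
def Claim_equal_f : Prop := ∀ (n : Int), Dom_f n → Spec_f n (f n)

-- ===== LEMMAS AND PROOFS =====

-- the factorial table is exactly [1!, 2!, …, m!] (stated with a shifted start s)
lemma factTable_key (m : Nat) : ∀ (s : Nat) (acc : List Int),
    (((List.range m).map (fun k : Nat => (s : Int) + 1 + (k : Int))).foldl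
        (fun st i => (st.1 * i, st.2 ++ [st.1 * i])) ((Nat.factorial s : Int), acc)).2
      = acc ++ (List.range m).map (fun k : Nat => (Nat.factorial (s + 1 + k) : Int)) := by
  induction m with
  | zero => intro s acc; simp
  | succ m ih =>
    intro s acc
    rw [List.range_succ_eq_map]
    simp only [List.map_cons, List.map_map, List.foldl_cons, Function.comp_def]
    have h1 : (Nat.factorial s : Int) * ((s : Int) + 1 + ((0 : Nat) : Int))
        = (Nat.factorial (s + 1) : Int) := by
      push_cast [Nat.factorial_succ]; ring
    have h2 : ((List.range m).map (fun k : Nat => (s : Int) + 1 + ((k + 1 : Nat) : Int)))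
        = (List.range m).map (fun k : Nat => ((s + 1 : Nat) : Int) + 1 + (k : Int)) := by
      apply List.map_congr_left; intro k _; push_cast; ring
    rw [h1, h2, ih (s + 1) (acc ++ [(Nat.factorial (s + 1) : Int)])]
    simp only [List.append_assoc, List.cons_append]
    congr 2
    apply List.map_congr_left; intro k _
    simp only [Int.natCast_inj]
    congr 1; omega

lemma factTable_eq (n : Int) :
    (factTable n).2 = (List.range (n + 1 - 1).toNat).map (fun k : Nat => (Nat.factorial (k + 1) : Int)) := by
  unfold factTable
  rw [PySem.List.pyRange_one]
  have h : (List.range (n + 1 - 1).toNat).map (fun k : Nat => (1 : Int) + (k : Int))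
      = (List.range (n + 1 - 1).toNat).map (fun k : Nat => ((0 : Nat) : Int) + 1 + (k : Int)) := by
    apply List.map_congr_left; intro k _; push_cast; ring
  rw [h]
  have := factTable_key (n + 1 - 1).toNat 0 []
  simp only [Nat.factorial_zero, Nat.cast_one] at this
  rw [this]
  simp only [List.nil_append]
  apply List.map_congr_left; intro k _
  simp only [Int.natCast_inj]
  congr 1; omega

-- ===== VERDICT (by name: the statement is the Claim_ definition above) =====
theorem f_spec : Claim_equal_f := by
  intro n _
  unfold Spec_f f f_alt stepA
  rw [PySem.List.foldl_append_singleton_eq_map, List.nil_append, factTable_eq]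
  apply List.map_congr_left
  intro i hi
  rw [PySem.List.mem_pyRange_one] at hi
  split_ifs with h
  · -- even branch: the table entry at i-1 is (i.toNat)!
    have hk : i - 1 = ((i - 1).toNat : Int) := by omega
    rw [hk, PySem.List.pyGetD_natCast]
    have hlt : (i - 1).toNat < (n + 1 - 1).toNat := by omega
    rw [List.getD_eq_getElem?_getD, List.getElem?_map, List.getElem?_range hlt]
    simp only [Option.map_some, Option.getD_some]
    unfold pyFactorial
    simp only [Int.natCast_inj]
    congr 1; omega
  · rfl
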